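-- pv_equiv track=rewrite | github.com/William-Carlsson/Coding-Projects | Computional-Methods-Bioinformatics/A3/task1.py | identify_non_essential_enzymes
-- ===== SOURCE A (Python) =====
-- def build_graph(reactions):
--     """
--     Build a graph from the given reactions.
--
--     Parameters:
--         reactions (list): List of tuples (start_metabolite, end_metabolite, enzyme).
--
--     Returns:
--         dict: A dictionary where keys are metabolites and values are lists of (neighbor, enzyme).
--     """
--     graph = {}
--     for start, end, enzyme in reactions:
--         if start not in graph:
--             graph[start] = []
--         graph[start].append((end, enzyme))
--     return graph
--
-- def has_path(graph, start, end, visited):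
--     """
--     Check if there is a path from start to end in the graph.
--
--     Parameters:
--         graph (dict): Graph representation.
--         start (str): Starting node.
--         end (str): Target node.
--         visited (set): Set of visited nodes.
--
--     Returns:
--         bool: True if a path exists, False otherwise.
--     """
--     if start == end:
--         return True
--     visited.add(start)
--     for neighbor, _ in graph.get(start, []):
--         if neighbor not in visited:
--             if has_path(graph, neighbor, end, visited):
--                 return True
--     return False
--
-- def identify_non_essential_enzymes(reactions, start, end):
--     """
--     Identifies non-essential enzymes in a metabolic pathway.
--
--     Parameters:
--         reactions (list): List of tuples (start_metabolite, end_metabolite, enzyme).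
--         start (str): Starting metabolite (in case of task 1 its 'glucose').
--         end (str): Target metabolite (in case of task 1 its 'pyruvate').
--
--     Returns:
--         list: List of non-essential enzymes.
--     """
--
--     graph = build_graph(reactions)
--
--     # Identify all enzymes in the pathway
--     enzymes = {enzyme for _, _, enzyme in reactions}
--     non_essential = []
--
--     # Test each enzyme's essentiality
--     for enzyme in enzymes:
--         # Create a copy of the graph with the enzyme's reactions removed
--         modified_graph = {
--             node: [(neighbor, enz) for neighbor, enz in edges if enz != enzyme]
--             for node, edges in graph.items()
--         }
--
--         # Check if a path still exists from start to end
--         if has_path(modified_graph, start, end, set()):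
--             non_essential.append(enzyme)
--
--     return non_essential
-- ===== SOURCE B (Python) =====
-- def identify_non_essential_enzymes(reactions, start, end):
--     # Build the adjacency once; test each enzyme with an iterative stack DFS that
--     # skips that enzyme's edges inline, instead of rebuilding a filtered graph per enzyme.
--     graph = {}
--     for s, e, enz in reactions:
--         graph.setdefault(s, []).append((e, enz))
--
--     def reaches(banned):
--         stack = [start]
--         visited = {start}
--         while stack:
--             node = stack.pop()
--             if node == end:
--                 return True
--             for nb, enz in graph.get(node, []):
--                 if enz != banned and nb not in visited:
--                     visited.add(nb)
--                     stack.append(nb)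
--         return False
--
--     return [enz for enz in dict.fromkeys(e for _, _, e in reactions) if reaches(enz)]
-- ===== Notes on version B (the rewrite author's own statement) =====
-- stated objective: faster
-- what changed: B builds the adjacency dict once and tests each enzyme with an iterative stack DFS that skips that enzyme's edges inline, instead of rebuilding a filtered copy of the whole graph per enzyme and running a recursive shared-visited DFS; enzymes are collected by an ordered dedup and a comprehension instead of a set and an append loop.
import Mathlib
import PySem

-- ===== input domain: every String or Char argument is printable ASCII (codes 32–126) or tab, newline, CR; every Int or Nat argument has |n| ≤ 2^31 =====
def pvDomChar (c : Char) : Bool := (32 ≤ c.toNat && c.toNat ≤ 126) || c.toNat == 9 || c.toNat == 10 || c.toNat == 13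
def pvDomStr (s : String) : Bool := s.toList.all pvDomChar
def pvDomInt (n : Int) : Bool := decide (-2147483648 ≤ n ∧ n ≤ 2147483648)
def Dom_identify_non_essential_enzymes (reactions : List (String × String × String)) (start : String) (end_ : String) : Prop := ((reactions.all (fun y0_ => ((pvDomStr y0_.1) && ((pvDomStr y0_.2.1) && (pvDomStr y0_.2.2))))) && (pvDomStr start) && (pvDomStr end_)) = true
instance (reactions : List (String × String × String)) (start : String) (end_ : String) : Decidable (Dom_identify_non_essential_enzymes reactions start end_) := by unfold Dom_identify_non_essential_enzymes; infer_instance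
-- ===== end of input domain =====

-- B removes A's per-enzyme filtered copy of the graph and A's recursive shared-visited DFS,
-- using one adjacency dict and an iterative stack DFS that skips the tested enzyme's edges inline
-- (measurably faster by a constant factor); output equality is proved for the Lean enzyme order
-- (the Python outputs are equal as sets; Python's set iteration order is not modelled).

-- ===== PORT A =====

-- build_graph: if start not in graph: graph[start] = []; graph[start].append((end, enzyme))
def pvBuildGraph (reactions : List (String × String × String)) :
    PySem.Dict String (List (String × String)) :=
  reactions.foldl (fun g r =>
    let g' := if g.contains r.1 then g else g.insert r.1 []
    g'.modify r.1 [] (fun es => es ++ [(r.2.1, r.2.2)])) PySem.Dict.empty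

-- the for-loop of has_path; `hp` is the recursive call (has_path at one level less fuel),
-- the mutated `visited` set is threaded through explicitly
def pvHpLoop (hp : String → PySem.Set String → Bool × PySem.Set String)
    (edges : List (String × String)) (visited : PySem.Set String) :
    Bool × PySem.Set String :=
  match edges with
  | [] => (false, visited)
  | p :: rest =>
    if p.1 ∈ visited then pvHpLoop hp rest visited
    else
      let r := hp p.1 visited
      if r.1 then r else pvHpLoop hp rest r.2

-- has_path; `fuel` is only a termination device: each recursive call visits a previously
-- unvisited edge target, so reactions.length + 1 is always enough (proved below)
def pvHasPath (g : PySem.Dict String (List (String × String))) (end_ : String) :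
    Nat → String → PySem.Set String → Bool × PySem.Set String
  | 0 => fun _ visited => (false, visited)
  | fuel + 1 => fun start visited =>
    if start = end_ then (true, visited)
    else pvHpLoop (pvHasPath g end_ fuel) (g.getD start []) (PySem.Set.add visited start)

def identify_non_essential_enzymes (reactions : List (String × String × String)) (start : String) (end_ : String) : List String :=
  let graph := pvBuildGraph reactions
  let enzymes := PySem.Set.ofList (reactions.map (fun r => r.2.2))
  enzymes.foldl (fun acc enzyme =>
    -- dict comprehension over graph.items (keys stay distinct, so it is the mapped items list)
    let mg : PySem.Dict String (List (String × String)) :=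
      PySem.Dict.mk (graph.items.map (fun p => (p.1, p.2.filter (fun q => q.2 ≠ enzyme))))
    if (pvHasPath mg end_ (reactions.length + 1) start PySem.Set.empty).1 then
      acc ++ [enzyme]
    else acc) []

-- ===== PORT B =====

-- graph.setdefault(s, []).append((e, enz))
def pvBuildGraphB (reactions : List (String × String × String)) :
    PySem.Dict String (List (String × String)) :=
  reactions.foldl (fun g r =>
    (g.setdefault r.1 []).modify r.1 [] (fun es => es ++ [(r.2.1, r.2.2)])) PySem.Dict.empty

-- the while loop of `reaches`; the Python list-stack (append/pop at the right end) is modelled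
-- head-first: push = cons, pop = head, which pops in exactly Python's order.
-- `fuel` is only a termination device: every push marks a fresh node visited, so pops are
-- bounded by reactions.length + 1 (proved below).
def pvDfs (g : PySem.Dict String (List (String × String))) (end_ banned : String) :
    Nat → List String → PySem.Set String → Bool
  | _, [], _ => false
  | 0, _ :: _, _ => false
  | fuel + 1, node :: rest, visited =>
    if node = end_ then true
    else
      let sv := (g.getD node []).foldl
        (fun (sv : List String × PySem.Set String) p =>
          if p.2 ≠ banned ∧ p.1 ∉ sv.2 then (p.1 :: sv.1, PySem.Set.add sv.2 p.1) else sv)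
        (rest, visited)
      pvDfs g end_ banned fuel sv.1 sv.2

def identify_non_essential_enzymes_alt (reactions : List (String × String × String)) (start : String) (end_ : String) : List String :=
  let graph := pvBuildGraphB reactions
  (PySem.List.dedup (reactions.map (fun r => r.2.2))).filter (fun enz =>
    pvDfs graph end_ enz (reactions.length + 1) [start] (PySem.Set.add PySem.Set.empty start))

-- ===== PRECONDITION & SPEC =====
def Spec_identify_non_essential_enzymes (reactions : List (String × String × String)) (start : String) (end_ : String) (out : List String) : Prop := out = identify_non_essential_enzymes_alt reactions start end_
instance (reactions : List (String × String × String)) (start : String) (end_ : String) (out : List String) : Decidable (Spec_identify_non_essential_enzymes reactions start end_ out) := by unfold Spec_identify_non_essential_enzymes; infer_instance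

-- ===== CLAIM (what is proved, stated in full; the proofs are below) =====
def Claim_equal_identify_non_essential_enzymes : Prop := ∀ (reactions : List (String × String × String)) (start : String) (end_ : String), Dom_identify_non_essential_enzymes reactions start end_ → Spec_identify_non_essential_enzymes reactions start end_ (identify_non_essential_enzymes reactions start end_)


-- ===== LEMMAS AND PROOFS =====

-- all edge targets of the reaction list
def pvTargets (reactions : List (String × String × String)) : List String :=
  reactions.map (fun r => r.2.1)

-- how many (with multiplicity) targets are still unvisited: the fuel measure
def pvCnt (T : List String) (v : PySem.Set String) : Nat :=
  T.countP (fun x => decide (x ∉ v))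

-- the edge relation A's DFS follows on a dict h (some edge from u ends at v)
def pvRelA (h : PySem.Dict String (List (String × String))) (u v : String) : Prop :=
  ∃ p ∈ h.getD u [], p.1 = v

-- the edge relation B's DFS follows (edge not labelled z)
def pvRelB (g : PySem.Dict String (List (String × String))) (z u v : String) : Prop :=
  ∃ p ∈ g.getD u [], p.2 ≠ z ∧ p.1 = v

-- "everything newly visited between v and v' is a dead end": no hit on e, successors stay in v'
def pvClosed (h : PySem.Dict String (List (String × String))) (e : String)
    (v v' : PySem.Set String) : Prop :=
  ∀ u ∈ v', u ∉ v → u ≠ e ∧ ∀ p ∈ h.getD u [], p.1 ∈ v'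

-- equation lemmas for the ports
theorem pvHpLoop_nil (hp : String → PySem.Set String → Bool × PySem.Set String)
    (v : PySem.Set String) : pvHpLoop hp [] v = (false, v) := rfl

theorem pvHpLoop_cons (hp : String → PySem.Set String → Bool × PySem.Set String)
    (p : String × String) (rest : List (String × String)) (v : PySem.Set String) :
    pvHpLoop hp (p :: rest) v =
      if p.1 ∈ v then pvHpLoop hp rest v
      else if (hp p.1 v).1 then hp p.1 v else pvHpLoop hp rest (hp p.1 v).2 := rfl

theorem pvHasPath_zero (g : PySem.Dict String (List (String × String))) (e s : String)
    (v : PySem.Set String) : pvHasPath g e 0 s v = (false, v) := rfl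

theorem pvHasPath_succ (g : PySem.Dict String (List (String × String))) (e s : String)
    (fuel : Nat) (v : PySem.Set String) :
    pvHasPath g e (fuel + 1) s v =
      if s = e then (true, v)
      else pvHpLoop (pvHasPath g e fuel) (g.getD s []) (PySem.Set.add v s) := rfl

theorem pvDfs_nil (g : PySem.Dict String (List (String × String))) (e z : String)
    (fuel : Nat) (v : PySem.Set String) : pvDfs g e z fuel [] v = false := by
  cases fuel <;> rfl

theorem pvDfs_zero (g : PySem.Dict String (List (String × String))) (e z : String)
    (st : List String) (v : PySem.Set String) : pvDfs g e z 0 st v = false := by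
  cases st <;> rfl

theorem pvDfs_cons (g : PySem.Dict String (List (String × String))) (e z node : String)
    (fuel : Nat) (rest : List String) (v : PySem.Set String) :
    pvDfs g e z (fuel + 1) (node :: rest) v =
      if node = e then true
      else
        pvDfs g e z fuel
          ((g.getD node []).foldl
            (fun (sv : List String × PySem.Set String) p =>
              if p.2 ≠ z ∧ p.1 ∉ sv.2 then (p.1 :: sv.1, PySem.Set.add sv.2 p.1) else sv)
            (rest, v)).1
          ((g.getD node []).foldl
            (fun (sv : List String × PySem.Set String) p =>
              if p.2 ≠ z ∧ p.1 ∉ sv.2 then (p.1 :: sv.1, PySem.Set.add sv.2 p.1) else sv)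
            (rest, v)).2 := rfl

-- counting helpers ---------------------------------------------------------

theorem pvCnt_mono (T : List String) (v w : PySem.Set String) (h : ∀ x ∈ v, x ∈ w) :
    pvCnt T w ≤ pvCnt T v := by
  refine List.countP_mono_left (fun x _ hx => ?_)
  simp only [decide_eq_true_eq] at *
  exact fun hv => hx (h x hv)

theorem pvCnt_le (T : List String) (v : PySem.Set String) : pvCnt T v ≤ T.length :=
  List.countP_le_length

theorem pvCnt_add_lt (T : List String) (v : PySem.Set String) (x : String)
    (hT : x ∈ T) (hv : x ∉ v) : pvCnt T (PySem.Set.add v x) < pvCnt T v := by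
  induction T with
  | nil => cases hT
  | cons t T ih =>
    by_cases hx : x = t
    · subst hx
      have h1 : (decide (x ∉ PySem.Set.add v x)) = false := by
        simp [PySem.Set.mem_add]
      have h2 : (decide (x ∉ v)) = true := by simpa using hv
      have hle : List.countP (fun y => decide (y ∉ PySem.Set.add v x)) T ≤
          List.countP (fun y => decide (y ∉ v)) T := by
        refine List.countP_mono_left (fun y _ hy => ?_)
        simp only [decide_eq_true_eq, PySem.Set.mem_add] at *
        exact fun h => hy (Or.inl h)
      simp only [pvCnt, List.countP_cons, h1, h2,
        show (if (false = true) then 1 else 0) = 0 from by simp,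
        show (if True then 1 else 0) = 1 from by simp]
      omega
    · have hT' : x ∈ T := by
        rcases List.mem_cons.mp hT with h | h
        · exact absurd h hx
        · exact h
      have hrec := ih hT'
      have hif : (if (decide (t ∉ PySem.Set.add v x)) = true then 1 else 0) ≤
          (if (decide (t ∉ v)) = true then 1 else 0) := by
        by_cases ha : t ∈ v
        · have hc1 : (decide (t ∉ v)) = false := by simpa using ha
          have hc2 : (decide (t ∉ PySem.Set.add v x)) = false := by
            simp only [decide_eq_false_iff_not, not_not]
            exact (PySem.Set.mem_add v x t).mpr (Or.inl ha)
          simp [hc1]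
        · have hc1 : (decide (t ∉ v)) = true := by simpa using ha
          rw [hc1, if_pos rfl]
          split <;> omega
      simp only [pvCnt, List.countP_cons] at hrec ⊢
      omega

-- build_graph characterisation ---------------------------------------------

theorem pvBuildStep_getD (g : PySem.Dict String (List (String × String)))
    (r : String × String × String) (u : String) :
    ((let g' := if g.contains r.1 then g else g.insert r.1 []
      g'.modify r.1 [] (fun es => es ++ [(r.2.1, r.2.2)])).getD u []) =
    if u = r.1 then g.getD u [] ++ [(r.2.1, r.2.2)] else g.getD u [] := by
  by_cases hc : g.contains r.1
  · simp only [hc, if_true]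
    rw [PySem.Dict.getD_modify]
    by_cases hu : u = r.1 <;> simp [hu]
  · simp only [hc, Bool.false_eq_true, if_false]
    rw [PySem.Dict.getD_modify]
    by_cases hu : u = r.1
    · subst hu
      rw [if_pos rfl, if_pos rfl, PySem.Dict.getD_insert, if_pos rfl,
        PySem.Dict.getD_of_not_contains _ _ (by simpa using hc)]
    · rw [if_neg hu, if_neg hu, PySem.Dict.getD_insert, if_neg hu]

theorem pvBuildGraph_getD_aux (reactions : List (String × String × String))
    (g : PySem.Dict String (List (String × String))) (u : String) :
    (reactions.foldl (fun g r =>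
      let g' := if g.contains r.1 then g else g.insert r.1 []
      g'.modify r.1 [] (fun es => es ++ [(r.2.1, r.2.2)])) g).getD u [] =
    g.getD u [] ++ (reactions.filter (fun r => r.1 = u)).map (fun r => (r.2.1, r.2.2)) := by
  induction reactions generalizing g with
  | nil => simp
  | cons r rs ih =>
    simp only [List.foldl_cons, List.filter_cons]
    rw [ih]
    have hstep := pvBuildStep_getD g r u
    by_cases hu : u = r.1
    · subst hu
      rw [hstep, if_pos rfl]
      simp
    · rw [hstep, if_neg hu]
      have hd : (decide (r.1 = u)) = false := by
        simp only [decide_eq_false_iff_not]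
        exact fun h => hu h.symm
      simp [hd]

theorem pvBuildGraph_getD (reactions : List (String × String × String)) (u : String) :
    (pvBuildGraph reactions).getD u [] =
    (reactions.filter (fun r => r.1 = u)).map (fun r => (r.2.1, r.2.2)) := by
  have := pvBuildGraph_getD_aux reactions PySem.Dict.empty u
  simpa [pvBuildGraph] using this

theorem pvBuildGraphB_eq (reactions : List (String × String × String)) :
    pvBuildGraphB reactions = pvBuildGraph reactions := by
  unfold pvBuildGraphB pvBuildGraph
  congr 1
  funext g r
  by_cases hc : g.contains r.1
  · simp [PySem.Dict.setdefault_of_contains _ _ hc, hc]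
  · simp [PySem.Dict.setdefault_of_not_contains _ _ (by simpa using hc), hc]

-- the dict comprehension: lookups in the filtered copy are filtered lookups
theorem pvMk_map_get? (items : List (String × List (String × String)))
    (f : List (String × String) → List (String × String)) (u : String) :
    (PySem.Dict.mk (items.map (fun p => (p.1, f p.2)))).get? u =
    ((PySem.Dict.mk items).get? u).map f := by
  induction items with
  | nil => simp [PySem.Dict.get?]
  | cons p rest ih =>
    simp only [List.map_cons]
    rw [PySem.Dict.get?_mk_cons, PySem.Dict.get?_mk_cons]
    by_cases h : (p.1 == u) = true
    · rw [if_pos h, if_pos h]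
      rfl
    · rw [if_neg h, if_neg h]
      exact ih

theorem pvModified_getD (g : PySem.Dict String (List (String × String))) (z u : String) :
    (PySem.Dict.mk (g.items.map (fun p => (p.1, p.2.filter (fun q => q.2 ≠ z))))).getD u [] =
    (g.getD u []).filter (fun q => q.2 ≠ z) := by
  have h := pvMk_map_get? g.items (fun es => es.filter (fun q => q.2 ≠ z)) u
  rw [PySem.Dict.getD_eq_get?_getD, PySem.Dict.getD_eq_get?_getD, h]
  cases (PySem.Dict.mk g.items).get? u <;> rfl

-- A-side DFS correctness ----------------------------------------------------

theorem pvHpLoop_mono (hp : String → PySem.Set String → Bool × PySem.Set String)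
    (Hhp : ∀ s v, ∀ x ∈ v, x ∈ (hp s v).2) :
    ∀ (edges : List (String × String)) (v : PySem.Set String), ∀ x ∈ v,
      x ∈ (pvHpLoop hp edges v).2 := by
  intro edges
  induction edges with
  | nil => intro v x hx; rw [pvHpLoop_nil]; exact hx
  | cons p rest ih =>
    intro v x hx
    rw [pvHpLoop_cons]
    by_cases hm : p.1 ∈ v
    · rw [if_pos hm]; exact ih v x hx
    · rw [if_neg hm]
      by_cases hr : (hp p.1 v).1 = true
      · rw [if_pos hr]; exact Hhp p.1 v x hx
      · rw [if_neg hr]; exact ih _ x (Hhp p.1 v x hx)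

theorem pvHasPath_mono (g : PySem.Dict String (List (String × String))) (e : String) :
    ∀ (fuel : Nat) (s : String) (v : PySem.Set String), ∀ x ∈ v,
      x ∈ (pvHasPath g e fuel s v).2 := by
  intro fuel
  induction fuel with
  | zero => intro s v x hx; rw [pvHasPath_zero]; exact hx
  | succ fuel ih =>
    intro s v x hx
    rw [pvHasPath_succ]
    by_cases hse : s = e
    · rw [if_pos hse]; exact hx
    · rw [if_neg hse]
      exact pvHpLoop_mono _ ih _ _ x ((PySem.Set.mem_add v s x).mpr (Or.inl hx))

theorem pvHpLoop_sound (hp : String → PySem.Set String → Bool × PySem.Set String)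
    (P : String → Prop) (Hhp : ∀ s v, (hp s v).1 = true → P s) :
    ∀ (edges : List (String × String)) (v : PySem.Set String),
      (pvHpLoop hp edges v).1 = true → ∃ p ∈ edges, P p.1 := by
  intro edges
  induction edges with
  | nil => intro v h; rw [pvHpLoop_nil] at h; exact absurd h (by simp)
  | cons p rest ih =>
    intro v h
    rw [pvHpLoop_cons] at h
    by_cases hm : p.1 ∈ v
    · rw [if_pos hm] at h
      obtain ⟨q, hq, hP⟩ := ih v h
      exact ⟨q, List.mem_cons_of_mem _ hq, hP⟩
    · rw [if_neg hm] at h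
      by_cases hr : (hp p.1 v).1 = true
      · exact ⟨p, List.mem_cons_self, Hhp p.1 v hr⟩
      · rw [if_neg hr] at h
        obtain ⟨q, hq, hP⟩ := ih _ h
        exact ⟨q, List.mem_cons_of_mem _ hq, hP⟩

theorem pvHasPath_sound (g : PySem.Dict String (List (String × String))) (e : String) :
    ∀ (fuel : Nat) (s : String) (v : PySem.Set String),
      (pvHasPath g e fuel s v).1 = true → Relation.ReflTransGen (pvRelA g) s e := by
  intro fuel
  induction fuel with
  | zero => intro s v h; rw [pvHasPath_zero] at h; exact absurd h (by simp)
  | succ fuel ih =>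
    intro s v h
    rw [pvHasPath_succ] at h
    by_cases hse : s = e
    · exact hse ▸ Relation.ReflTransGen.refl
    · rw [if_neg hse] at h
      obtain ⟨p, hp, hP⟩ :=
        pvHpLoop_sound _ (fun x => Relation.ReflTransGen (pvRelA g) x e)
          (fun s v hh => ih s v hh) _ _ h
      exact Relation.ReflTransGen.head ⟨p, hp, rfl⟩ hP

theorem pvHpLoop_false (h : PySem.Dict String (List (String × String))) (e : String)
    (T : List String) (N : Nat)
    (hp : String → PySem.Set String → Bool × PySem.Set String)
    (Hmono : ∀ s v, ∀ x ∈ v, x ∈ (hp s v).2)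
    (Hfalse : ∀ s v, pvCnt T (PySem.Set.add v s) < N → (hp s v).1 = false →
      s ∈ (hp s v).2 ∧ s ≠ e ∧ pvClosed h e v (hp s v).2) :
    ∀ (edges : List (String × String)) (v : PySem.Set String),
      pvCnt T v ≤ N → (∀ p ∈ edges, p.1 ∈ T) →
      (pvHpLoop hp edges v).1 = false →
      (∀ p ∈ edges, p.1 ∈ (pvHpLoop hp edges v).2) ∧
      pvClosed h e v (pvHpLoop hp edges v).2 := by
  intro edges
  induction edges with
  | nil =>
    intro v _ _ _
    rw [pvHpLoop_nil]
    exact ⟨fun p hp => absurd hp (List.not_mem_nil), fun u hu hnv => absurd hu hnv⟩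
  | cons p rest ih =>
    intro v hcnt hTe hfalse
    rw [pvHpLoop_cons] at hfalse ⊢
    by_cases hm : p.1 ∈ v
    · rw [if_pos hm] at hfalse ⊢
      obtain ⟨h1, h2⟩ := ih v hcnt (fun q hq => hTe q (List.mem_cons_of_mem _ hq)) hfalse
      refine ⟨fun q hq => ?_, h2⟩
      rcases List.mem_cons.mp hq with rfl | hq'
      · exact pvHpLoop_mono hp Hmono rest v q.1 hm
      · exact h1 q hq'
    · rw [if_neg hm] at hfalse ⊢
      have hT1 : p.1 ∈ T := hTe p List.mem_cons_self
      have hlt : pvCnt T (PySem.Set.add v p.1) < pvCnt T v := pvCnt_add_lt T v p.1 hT1 hm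
      have hN : pvCnt T (PySem.Set.add v p.1) < N := lt_of_lt_of_le hlt hcnt
      by_cases hr : (hp p.1 v).1 = true
      · rw [if_pos hr] at hfalse
        rw [hr] at hfalse
        exact absurd hfalse (by simp)
      · have hrf : (hp p.1 v).1 = false := by
          cases hb : (hp p.1 v).1
          · rfl
          · exact absurd hb hr
        rw [if_neg hr] at hfalse ⊢
        obtain ⟨hmem, hne, hcl⟩ := Hfalse p.1 v hN hrf
        have hcnt2 : pvCnt T (hp p.1 v).2 ≤ N :=
          le_trans (pvCnt_mono T v _ (Hmono p.1 v)) hcnt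
        obtain ⟨h1, h2⟩ := ih _ hcnt2 (fun q hq => hTe q (List.mem_cons_of_mem _ hq)) hfalse
        refine ⟨fun q hq => ?_, fun u hu hnv => ?_⟩
        · rcases List.mem_cons.mp hq with rfl | hq'
          · exact pvHpLoop_mono hp Hmono rest _ q.1 hmem
          · exact h1 q hq'
        · by_cases hu2 : u ∈ (hp p.1 v).2
          · obtain ⟨hune, hsucc⟩ := hcl u hu2 hnv
            exact ⟨hune, fun q hq => pvHpLoop_mono hp Hmono rest _ q.1 (hsucc q hq)⟩
          · exact h2 u hu hu2

theorem pvHasPath_false (h : PySem.Dict String (List (String × String))) (e : String)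
    (T : List String) (HT : ∀ u p, p ∈ h.getD u [] → p.1 ∈ T) :
    ∀ (fuel : Nat) (s : String) (v : PySem.Set String),
      pvCnt T (PySem.Set.add v s) < fuel → (pvHasPath h e fuel s v).1 = false →
      s ∈ (pvHasPath h e fuel s v).2 ∧ s ≠ e ∧
      pvClosed h e v (pvHasPath h e fuel s v).2 := by
  intro fuel
  induction fuel with
  | zero => intro s v hcnt; omega
  | succ fuel ih =>
    intro s v hcnt hfalse
    rw [pvHasPath_succ] at hfalse ⊢
    by_cases hse : s = e
    · rw [if_pos hse] at hfalse
      exact absurd hfalse (by simp)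
    · rw [if_neg hse] at hfalse ⊢
      obtain ⟨h1, h2⟩ :=
        pvHpLoop_false h e T fuel (pvHasPath h e fuel) (pvHasPath_mono h e fuel)
          (fun s' v' hc hf => ih s' v' hc hf) (h.getD s []) (PySem.Set.add v s)
          (by omega) (fun p hp => HT s p hp) hfalse
      refine ⟨?_, hse, fun u hu hnv => ?_⟩
      · exact pvHpLoop_mono _ (pvHasPath_mono h e fuel) _ _ s
          ((PySem.Set.mem_add v s s).mpr (Or.inr rfl))
      · by_cases hu2 : u ∈ PySem.Set.add v s
        · rcases (PySem.Set.mem_add v s u).mp hu2 with huv | rfl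
          · exact absurd huv hnv
          · exact ⟨hse, h1⟩
        · exact h2 u hu hu2

theorem pvA_top (h : PySem.Dict String (List (String × String))) (e : String)
    (T : List String) (HT : ∀ u p, p ∈ h.getD u [] → p.1 ∈ T) (s : String) :
    (pvHasPath h e (T.length + 1) s PySem.Set.empty).1 = true ↔
      Relation.ReflTransGen (pvRelA h) s e := by
  constructor
  · exact pvHasPath_sound h e (T.length + 1) s PySem.Set.empty
  · intro hrt
    by_contra hfalse
    have hf : (pvHasPath h e (T.length + 1) s PySem.Set.empty).1 = false := by
      cases hb : (pvHasPath h e (T.length + 1) s PySem.Set.empty).1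
      · rfl
      · exact absurd hb hfalse
    have hcnt : pvCnt T (PySem.Set.add PySem.Set.empty s) < T.length + 1 :=
      lt_of_le_of_lt (pvCnt_le _ _) (Nat.lt_succ_self _)
    obtain ⟨hs, hne, hcl⟩ := pvHasPath_false h e T HT (T.length + 1) s PySem.Set.empty hcnt hf
    have hempty : ∀ x : String, x ∉ (PySem.Set.empty : PySem.Set String) := by
      intro x hx
      simp [PySem.Set.empty] at hx
    have key : ∀ x, Relation.ReflTransGen (pvRelA h) x e →
        x ∈ (pvHasPath h e (T.length + 1) s PySem.Set.empty).2 → False := by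
      intro x hx
      induction hx using Relation.ReflTransGen.head_induction_on with
      | refl =>
        intro he
        exact (hcl e he (hempty e)).1 rfl
      | head hr _ ihp =>
        rename_i a b _
        intro ha
        obtain ⟨p, hpm, hp1⟩ := hr
        exact ihp (hp1 ▸ (hcl a ha (hempty a)).2 p hpm)
    exact key s hrt hs

-- B-side: the push fold -----------------------------------------------------

theorem pvPush_facts (z : String) (T : List String) :
    ∀ (L : List (String × String)) (st : List String) (vi : PySem.Set String),
      (∀ p ∈ L, p.1 ∈ T) →
      (∀ x ∈ st, x ∈ (L.foldl (fun (sv : List String × PySem.Set String) p =>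
          if p.2 ≠ z ∧ p.1 ∉ sv.2 then (p.1 :: sv.1, PySem.Set.add sv.2 p.1) else sv)
          (st, vi)).1) ∧
      (∀ x ∈ vi, x ∈ (L.foldl (fun (sv : List String × PySem.Set String) p =>
          if p.2 ≠ z ∧ p.1 ∉ sv.2 then (p.1 :: sv.1, PySem.Set.add sv.2 p.1) else sv)
          (st, vi)).2) ∧
      (∀ x ∈ (L.foldl (fun (sv : List String × PySem.Set String) p =>
          if p.2 ≠ z ∧ p.1 ∉ sv.2 then (p.1 :: sv.1, PySem.Set.add sv.2 p.1) else sv)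
          (st, vi)).1, x ∈ st ∨ ∃ p ∈ L, p.2 ≠ z ∧ p.1 = x) ∧
      (∀ x ∈ (L.foldl (fun (sv : List String × PySem.Set String) p =>
          if p.2 ≠ z ∧ p.1 ∉ sv.2 then (p.1 :: sv.1, PySem.Set.add sv.2 p.1) else sv)
          (st, vi)).2, x ∈ vi ∨ x ∈ (L.foldl (fun (sv : List String × PySem.Set String) p =>
          if p.2 ≠ z ∧ p.1 ∉ sv.2 then (p.1 :: sv.1, PySem.Set.add sv.2 p.1) else sv)
          (st, vi)).1) ∧
      ((∀ x ∈ st, x ∈ vi) → ∀ x ∈ (L.foldl (fun (sv : List String × PySem.Set String) p =>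
          if p.2 ≠ z ∧ p.1 ∉ sv.2 then (p.1 :: sv.1, PySem.Set.add sv.2 p.1) else sv)
          (st, vi)).1, x ∈ (L.foldl (fun (sv : List String × PySem.Set String) p =>
          if p.2 ≠ z ∧ p.1 ∉ sv.2 then (p.1 :: sv.1, PySem.Set.add sv.2 p.1) else sv)
          (st, vi)).2) ∧
      (∀ p ∈ L, p.2 ≠ z → p.1 ∈ (L.foldl (fun (sv : List String × PySem.Set String) p =>
          if p.2 ≠ z ∧ p.1 ∉ sv.2 then (p.1 :: sv.1, PySem.Set.add sv.2 p.1) else sv)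
          (st, vi)).2) ∧
      ((L.foldl (fun (sv : List String × PySem.Set String) p =>
          if p.2 ≠ z ∧ p.1 ∉ sv.2 then (p.1 :: sv.1, PySem.Set.add sv.2 p.1) else sv)
          (st, vi)).1.length + pvCnt T (L.foldl (fun (sv : List String × PySem.Set String) p =>
          if p.2 ≠ z ∧ p.1 ∉ sv.2 then (p.1 :: sv.1, PySem.Set.add sv.2 p.1) else sv)
          (st, vi)).2 ≤ st.length + pvCnt T vi) := by
  intro L
  induction L with
  | nil =>
    intro st vi _
    simp only [List.foldl_nil]
    exact ⟨fun x hx => hx, fun x hx => hx, fun x hx => Or.inl hx, fun x hx => Or.inl hx,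
      fun h x hx => h x hx, fun p hp => absurd hp (List.not_mem_nil), le_refl _⟩
  | cons p rest ih =>
    intro st vi hTL
    simp only [List.foldl_cons]
    by_cases hc : p.2 ≠ z ∧ p.1 ∉ vi
    · rw [if_pos hc]
      obtain ⟨i1, i2, i3, i4, i5, i6, i7⟩ :=
        ih (p.1 :: st) (PySem.Set.add vi p.1) (fun q hq => hTL q (List.mem_cons_of_mem _ hq))
      refine ⟨fun x hx => i1 x (List.mem_cons_of_mem _ hx),
        fun x hx => i2 x ((PySem.Set.mem_add vi p.1 x).mpr (Or.inl hx)),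
        fun x hx => ?_, fun x hx => ?_, fun hsub x hx => ?_, fun q hq hqz => ?_, ?_⟩
      · rcases i3 x hx with hx' | ⟨q, hq, hqz, hqx⟩
        · rcases List.mem_cons.mp hx' with rfl | hx''
          · exact Or.inr ⟨p, List.mem_cons_self, hc.1, rfl⟩
          · exact Or.inl hx''
        · exact Or.inr ⟨q, List.mem_cons_of_mem _ hq, hqz, hqx⟩
      · rcases i4 x hx with hx' | hx'
        · rcases (PySem.Set.mem_add vi p.1 x).mp hx' with hxv | rfl
          · exact Or.inl hxv
          · exact Or.inr (i1 p.1 List.mem_cons_self)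
        · exact Or.inr hx'
      · refine i5 (fun y hy => ?_) x hx
        rcases List.mem_cons.mp hy with h | hy'
        · exact (PySem.Set.mem_add vi p.1 y).mpr (Or.inr h)
        · exact (PySem.Set.mem_add vi p.1 y).mpr (Or.inl (hsub y hy'))
      · rcases List.mem_cons.mp hq with rfl | hq'
        · exact i2 q.1 ((PySem.Set.mem_add vi q.1 q.1).mpr (Or.inr rfl))
        · exact i6 q hq' hqz
      · have hT1 : p.1 ∈ T := hTL p List.mem_cons_self
        have := pvCnt_add_lt T vi p.1 hT1 hc.2
        simp only [List.length_cons] at i7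
        omega
    · rw [if_neg hc]
      obtain ⟨i1, i2, i3, i4, i5, i6, i7⟩ :=
        ih st vi (fun q hq => hTL q (List.mem_cons_of_mem _ hq))
      refine ⟨i1, i2, fun x hx => ?_, i4, i5, fun q hq hqz => ?_, i7⟩
      · rcases i3 x hx with hx' | ⟨q, hq, hqz, hqx⟩
        · exact Or.inl hx'
        · exact Or.inr ⟨q, List.mem_cons_of_mem _ hq, hqz, hqx⟩
      · rcases List.mem_cons.mp hq with rfl | hq'
        · have hqv : q.1 ∈ vi := by
            by_contra hqv
            exact hc ⟨hqz, hqv⟩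
          exact i2 q.1 hqv
        · exact i6 q hq' hqz

-- B-side DFS correctness ----------------------------------------------------

theorem pvB_sound (g : PySem.Dict String (List (String × String))) (e z : String) :
    ∀ (fuel : Nat) (stack : List String) (vi : PySem.Set String),
      pvDfs g e z fuel stack vi = true →
      ∃ x ∈ stack, Relation.ReflTransGen (pvRelB g z) x e := by
  intro fuel
  induction fuel with
  | zero => intro stack vi h; rw [pvDfs_zero] at h; exact absurd h (by simp)
  | succ fuel ih =>
    intro stack vi h
    match stack with
    | [] => rw [pvDfs_nil] at h; exact absurd h (by simp)
    | node :: rest =>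
      rw [pvDfs_cons] at h
      by_cases hne : node = e
      · exact ⟨node, List.mem_cons_self, hne ▸ Relation.ReflTransGen.refl⟩
      · rw [if_neg hne] at h
        obtain ⟨x, hx, hrt⟩ := ih _ _ h
        obtain ⟨_, _, i3, _, _, _, _⟩ :=
          pvPush_facts z ((g.getD node []).map Prod.fst) (g.getD node []) rest vi
            (fun p hp => List.mem_map.mpr ⟨p, hp, rfl⟩)
        rcases i3 x hx with hx' | ⟨p, hp, hpz, hpx⟩
        · exact ⟨x, List.mem_cons_of_mem _ hx', hrt⟩
        · exact ⟨node, List.mem_cons_self,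
            Relation.ReflTransGen.head ⟨p, hp, hpz, hpx⟩ hrt⟩

def pvInv (g : PySem.Dict String (List (String × String))) (e z : String)
    (stack : List String) (vi : PySem.Set String) : Prop :=
  (∀ x ∈ stack, x ∈ vi) ∧
  (∀ u ∈ vi, u ∉ stack → u ≠ e ∧ ∀ p ∈ g.getD u [], p.2 ≠ z → p.1 ∈ vi)

theorem pvB_false (g : PySem.Dict String (List (String × String))) (e z : String)
    (T : List String) (HT : ∀ u p, p ∈ g.getD u [] → p.1 ∈ T) :
    ∀ (fuel : Nat) (stack : List String) (vi : PySem.Set String),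
      stack.length + pvCnt T vi ≤ fuel → pvInv g e z stack vi →
      pvDfs g e z fuel stack vi = false →
      ∀ x ∈ vi, ¬ Relation.ReflTransGen (pvRelB g z) x e := by
  intro fuel
  induction fuel with
  | zero =>
    intro stack vi hlen hinv _
    match stack with
    | [] =>
      intro x hx hrt
      induction hrt using Relation.ReflTransGen.head_induction_on with
      | refl => exact (hinv.2 e hx List.not_mem_nil).1 rfl
      | head hr _ ihp =>
        rename_i a b _
        obtain ⟨p, hpm, hpz, hp1⟩ := hr
        exact ihp ((hp1 ▸ (hinv.2 a hx List.not_mem_nil).2 p hpm hpz))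
    | node :: rest => simp at hlen
  | succ fuel ih =>
    intro stack vi hlen hinv hfalse
    match stack with
    | [] =>
      intro x hx hrt
      induction hrt using Relation.ReflTransGen.head_induction_on with
      | refl => exact (hinv.2 e hx List.not_mem_nil).1 rfl
      | head hr _ ihp =>
        rename_i a b _
        obtain ⟨p, hpm, hpz, hp1⟩ := hr
        exact ihp ((hp1 ▸ (hinv.2 a hx List.not_mem_nil).2 p hpm hpz))
    | node :: rest =>
      rw [pvDfs_cons] at hfalse
      by_cases hne : node = e
      · rw [if_pos hne] at hfalse
        exact absurd hfalse (by simp)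
      · rw [if_neg hne] at hfalse
        obtain ⟨i1, i2, i3, i4, i5, i6, i7⟩ :=
          pvPush_facts z T (g.getD node []) rest vi (fun p hp => HT node p hp)
        have hinv' : pvInv g e z
            ((g.getD node []).foldl
              (fun (sv : List String × PySem.Set String) p =>
                if p.2 ≠ z ∧ p.1 ∉ sv.2 then (p.1 :: sv.1, PySem.Set.add sv.2 p.1) else sv)
              (rest, vi)).1
            ((g.getD node []).foldl
              (fun (sv : List String × PySem.Set String) p =>
                if p.2 ≠ z ∧ p.1 ∉ sv.2 then (p.1 :: sv.1, PySem.Set.add sv.2 p.1) else sv)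
              (rest, vi)).2 := by
          refine ⟨i5 (fun y hy => hinv.1 y (List.mem_cons_of_mem _ hy)), fun u hu hns => ?_⟩
          rcases i4 u hu with huv | hus
          · by_cases hust : u ∈ rest
            · exact absurd (i1 u hust) hns
            · by_cases hun : u = node
              · subst hun
                exact ⟨hne, fun p hp hpz => i6 p hp hpz⟩
              · have := hinv.2 u huv (by
                  intro hmem
                  rcases List.mem_cons.mp hmem with h | h
                  · exact hun h
                  · exact hust h)
                exact ⟨this.1, fun p hp hpz => i2 p.1 (this.2 p hp hpz)⟩
          · exact absurd hus hns
        have hrec := ih _ _ (by simp only [List.length_cons] at hlen; omega) hinv' hfalse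
        intro x hx hrt
        exact hrec x (i2 x hx) hrt

theorem pvB_top (g : PySem.Dict String (List (String × String))) (e z : String)
    (T : List String) (HT : ∀ u p, p ∈ g.getD u [] → p.1 ∈ T) (s : String) :
    pvDfs g e z (T.length + 1) [s] (PySem.Set.add PySem.Set.empty s) = true ↔
      Relation.ReflTransGen (pvRelB g z) s e := by
  constructor
  · intro ht
    obtain ⟨x, hx, hrt⟩ := pvB_sound g e z (T.length + 1) [s] _ ht
    rcases List.mem_cons.mp hx with rfl | hx'
    · exact hrt
    · exact absurd hx' List.not_mem_nil
  · intro hrt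
    by_contra hfalse
    have hf : pvDfs g e z (T.length + 1) [s] (PySem.Set.add PySem.Set.empty s) = false := by
      cases hb : pvDfs g e z (T.length + 1) [s] (PySem.Set.add PySem.Set.empty s)
      · rfl
      · exact absurd hb hfalse
    have hvi : ∀ x, x ∈ PySem.Set.add PySem.Set.empty s ↔ x = s := by
      intro x
      constructor
      · intro hx
        rcases (PySem.Set.mem_add PySem.Set.empty s x).mp hx with hx' | hx'
        · simp [PySem.Set.empty] at hx'
        · exact hx'
      · intro hx
        exact (PySem.Set.mem_add PySem.Set.empty s x).mpr (Or.inr hx)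
    refine pvB_false g e z T HT (T.length + 1) [s] _ ?_ ?_ hf s ((hvi s).mpr rfl) hrt
    · have := pvCnt_le T (PySem.Set.add PySem.Set.empty s)
      simp only [List.length_singleton]
      omega
    · constructor
      · intro x hx
        rcases List.mem_cons.mp hx with rfl | hx'
        · exact (hvi x).mpr rfl
        · exact absurd hx' List.not_mem_nil
      · intro u hu hns
        exact absurd (List.mem_singleton.mpr ((hvi u).mp hu)) hns

-- relating the two relations ------------------------------------------------

theorem pvRel_iff (reactions : List (String × String × String)) (z u v : String) :
    pvRelA (PySem.Dict.mk ((pvBuildGraph reactions).items.map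
        (fun p => (p.1, p.2.filter (fun q => q.2 ≠ z))))) u v ↔
    pvRelB (pvBuildGraph reactions) z u v := by
  unfold pvRelA pvRelB
  constructor
  · rintro ⟨p, hp, rfl⟩
    rw [pvModified_getD, List.mem_filter] at hp
    exact ⟨p, hp.1, by simpa using hp.2, rfl⟩
  · rintro ⟨p, hp, hz, rfl⟩
    refine ⟨p, ?_, rfl⟩
    rw [pvModified_getD, List.mem_filter]
    exact ⟨hp, by simpa using hz⟩

theorem pvHT_build (reactions : List (String × String × String)) :
    ∀ u p, p ∈ (pvBuildGraph reactions).getD u [] → p.1 ∈ pvTargets reactions := by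
  intro u p hp
  rw [pvBuildGraph_getD] at hp
  simp only [List.mem_map, List.mem_filter] at hp
  obtain ⟨r, ⟨hr, _⟩, hrp⟩ := hp
  exact List.mem_map.mpr ⟨r, hr, congrArg Prod.fst hrp⟩

theorem pvHT_modified (reactions : List (String × String × String)) (z : String) :
    ∀ u p, p ∈ (PySem.Dict.mk ((pvBuildGraph reactions).items.map
        (fun p => (p.1, p.2.filter (fun q => q.2 ≠ z))))).getD u [] →
      p.1 ∈ pvTargets reactions := by
  intro u p hp
  rw [pvModified_getD, List.mem_filter] at hp
  exact pvHT_build reactions u p hp.1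

-- per-enzyme agreement ------------------------------------------------------

theorem pvPerEnzyme (reactions : List (String × String × String)) (start end_ z : String) :
    (pvHasPath (PySem.Dict.mk ((pvBuildGraph reactions).items.map
        (fun p => (p.1, p.2.filter (fun q => q.2 ≠ z))))) end_ (reactions.length + 1)
        start PySem.Set.empty).1 =
    pvDfs (pvBuildGraphB reactions) end_ z (reactions.length + 1) [start]
        (PySem.Set.add PySem.Set.empty start) := by
  have hlen : reactions.length = (pvTargets reactions).length := by
    simp [pvTargets]
  rw [pvBuildGraphB_eq]
  refine Bool.coe_iff_coe.mp ?_
  rw [hlen]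
  rw [pvA_top _ end_ (pvTargets reactions) (pvHT_modified reactions z) start]
  rw [pvB_top _ end_ z (pvTargets reactions) (pvHT_build reactions) start]
  constructor
  · exact Relation.ReflTransGen.mono (fun a b => (pvRel_iff reactions z a b).mp)
  · exact Relation.ReflTransGen.mono (fun a b => (pvRel_iff reactions z a b).mpr)

-- ===== VERDICT (by name: the statement is the Claim_ definition above) =====
theorem identify_non_essential_enzymes_spec : Claim_equal_identify_non_essential_enzymes := by
  intro reactions start end_ _
  unfold Spec_identify_non_essential_enzymes
  unfold identify_non_essential_enzymes identify_non_essential_enzymes_alt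
  rw [PySem.List.dedup_eq_ofList]
  have hfold := PySem.List.foldl_append_if
    (p := fun enzyme => (pvHasPath (PySem.Dict.mk ((pvBuildGraph reactions).items.map
        (fun p => (p.1, p.2.filter (fun q => q.2 ≠ enzyme))))) end_ (reactions.length + 1)
        start PySem.Set.empty).1)
    (f := id) (l := PySem.Set.ofList (reactions.map (fun r => r.2.2))) (acc := [])
  simp only [id] at hfold
  rw [hfold]
  simp only [List.nil_append, List.map_id]
  refine List.filter_congr (fun z _ => ?_)
  exact pvPerEnzyme reactions start end_ z
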